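-- pv_equiv track=rewrite | github.com/Ashvinibodade/TCS_code_questions | Problem44.py | strongNum
-- ===== SOURCE A (Python) =====
-- def factorial(n):
--     fact=1
--     for i in range(1,n+1):
--         fact=fact*i
--     return fact
--
-- def strongNum(num):
--     temp=num
--     sum=0
--     rem=0
--     while temp!=0:
--         rem=temp%10
--         sum=sum+factorial(rem)
--         temp=temp//10
--
--     if sum==num and sum!=0:
--         return 1
--     return 0
-- ===== SOURCE B (Python) =====
-- _FACT = [1, 1, 2, 6, 24, 120, 720, 5040, 40320, 362880]
--
-- def strongNum(num):
--     total = sum(_FACT[int(ch)] for ch in str(num))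
--     return 1 if total == num and total != 0 else 0
-- ===== Notes on version B (the rewrite author's own statement) =====
-- stated objective: simpler
-- what changed: B sums a precomputed per-digit factorial table over the characters of str(num) in one comprehension, replacing A's mod/div digit-extraction while-loop and its hand-rolled factorial loop.
import Mathlib
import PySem

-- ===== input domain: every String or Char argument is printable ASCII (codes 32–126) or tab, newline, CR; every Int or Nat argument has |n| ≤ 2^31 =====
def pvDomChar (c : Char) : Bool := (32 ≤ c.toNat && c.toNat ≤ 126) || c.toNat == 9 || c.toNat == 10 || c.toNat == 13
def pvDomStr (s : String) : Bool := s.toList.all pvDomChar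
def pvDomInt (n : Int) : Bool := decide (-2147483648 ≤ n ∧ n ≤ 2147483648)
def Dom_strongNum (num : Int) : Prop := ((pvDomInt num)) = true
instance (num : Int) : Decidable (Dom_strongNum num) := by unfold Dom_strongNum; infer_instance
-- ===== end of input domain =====

-- B replaces A's mod/div digit loop with a hand-rolled factorial by a fold over the digits of
-- str(num) looked up in a precomputed per-digit factorial table (objective: simpler).

-- ===== PORT A =====
def factorialA (n : Int) : Int :=
  (PySem.List.pyRange 1 (n + 1)).foldl (fun fact i => fact * i) 1

-- Python's `while temp != 0`; for temp < 0 Python never terminates, which Pre_strongNum excludes,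
-- so the guard `temp ≤ 0` only makes the recursion total.
def strongLoop (temp sum : Int) : Int :=
  if temp ≤ 0 then sum
  else strongLoop (PySem.Int.floordiv temp 10) (sum + factorialA (PySem.Int.mod temp 10))
termination_by temp.toNat
decreasing_by
  rename_i h
  have h1 : 0 < temp := by omega
  have : PySem.Int.floordiv temp 10 = temp / 10 := by
    simp [PySem.Int.floordiv, Int.fdiv_eq_ediv]
  rw [this]
  omega

def strongNum (num : Int) : Int :=
  let sum := strongLoop num 0
  if sum = num ∧ sum ≠ 0 then 1 else 0

-- ===== PORT B =====
def pvFactTable : List Int := [1, 1, 2, 6, 24, 120, 720, 5040, 40320, 362880]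

-- `_FACT[int(ch)]`: both `int(ch)` and the indexing succeed in Python on every char of str(num)
-- for num ≥ 0 (the chars are '0'..'9'), so the `.getD 0` defaults never fire inside Pre_.
def strongNum_alt (num : Int) : Int :=
  let total := (PySem.Int.toStr num).toList.foldl
    (fun s c => s + (PySem.List.pyGet? pvFactTable
      ((PySem.Int.ofStr? (String.ofList [c])).getD 0)).getD 0) 0
  if total = num ∧ total ≠ 0 then 1 else 0

-- ===== PRECONDITION & SPEC =====
-- Pre_ excludes negative inputs: there A's while-loop never terminates (temp stays -1).
def Pre_strongNum (num : Int) : Prop := 0 ≤ num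
instance (num : Int) : Decidable (Pre_strongNum num) := by unfold Pre_strongNum; infer_instance
def pvWitness_strongNum : Int := (145)

def Spec_strongNum (num : Int) (out : Int) : Prop := out = strongNum_alt num
instance (num : Int) (out : Int) : Decidable (Spec_strongNum num out) := by unfold Spec_strongNum; infer_instance

-- ===== CLAIM (what is proved, stated in full; the proofs are below) =====
def Claim_equal_strongNum : Prop := ∀ (num : Int), Dom_strongNum num → Pre_strongNum num → Spec_strongNum num (strongNum num)

-- ===== LEMMAS AND PROOFS =====

-- B's per-character contribution
def hChar (c : Char) : Int :=
  (PySem.List.pyGet? pvFactTable ((PySem.Int.ofStr? (String.ofList [c])).getD 0)).getD 0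

-- digit-factorial sum as produced along Nat.toDigits' traversal
def dSum (n : Nat) : Int :=
  hChar (Nat.digitChar (n % 10)) + (if h : n / 10 = 0 then 0 else dSum (n / 10))
termination_by n
decreasing_by exact Nat.div_lt_self (by omega) (by omega)

lemma foldl_hChar (l : List Char) (s : Int) :
    l.foldl (fun s c => s + hChar c) s = s + (l.map hChar).sum := by
  induction l generalizing s with
  | nil => simp
  | cons c t ih =>
    simp only [List.foldl_cons, List.map_cons, List.sum_cons, ih]
    ring

lemma toDigitsCore_sum (f : Nat) : ∀ (n : Nat) (acc : List Char), n < f →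
    ((Nat.toDigitsCore 10 f n acc).map hChar).sum = dSum n + (acc.map hChar).sum := by
  induction f with
  | zero => intro n acc h; omega
  | succ f ih =>
    intro n acc h
    rw [Nat.toDigitsCore]
    by_cases h0 : n / 10 = 0
    · simp [h0, dSum]
    · have hn : 0 < n := by
        by_contra hc
        simp [Nat.eq_zero_of_not_pos hc] at h0
      have hd : n / 10 < n := Nat.div_lt_self hn (by norm_num)
      have hlt : n / 10 < f := by omega
      simp only [h0, if_false]
      rw [ih (n / 10) _ hlt]
      conv_rhs => rw [dSum, dif_neg h0]
      simp only [List.map_cons, List.sum_cons]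
      ring

lemma toDigits_sum (n : Nat) : ((Nat.toDigits 10 n).map hChar).sum = dSum n := by
  have := toDigitsCore_sum (n + 1) n [] (by omega)
  simpa [Nat.toDigits] using this

lemma hChar_digitChar (d : Nat) (hd : d < 10) : hChar (Nat.digitChar d) = factorialA d := by
  interval_cases d <;> decide

lemma floordiv_natCast (m : Nat) : PySem.Int.floordiv (m : Int) 10 = ((m / 10 : Nat) : Int) := by
  simp [PySem.Int.floordiv, Int.fdiv_eq_ediv]

lemma mod_natCast (m : Nat) : PySem.Int.mod (m : Int) 10 = ((m % 10 : Nat) : Int) := by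
  simp [PySem.Int.mod, Int.fmod_eq_emod]

lemma strongLoop_eq (n : Nat) : ∀ (s : Int), 0 < n → strongLoop (n : Int) s = s + dSum n := by
  induction n using Nat.strong_induction_on with
  | _ n ih =>
    intro s hn
    rw [strongLoop]
    have hng : ¬ ((n : Int) ≤ 0) := by exact_mod_cast by omega
    rw [if_neg hng]
    rw [floordiv_natCast, mod_natCast]
    rw [← hChar_digitChar (n % 10) (Nat.mod_lt _ (by omega))]
    by_cases h0 : n / 10 = 0
    · rw [h0]
      rw [strongLoop]
      simp [dSum, h0]
    · have hlt : n / 10 < n := Nat.div_lt_self hn (by omega)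
      rw [ih (n / 10) hlt _ (by omega)]
      conv_rhs => rw [dSum, dif_neg h0]
      ring

lemma total_eq (n : Nat) (hn : 0 < n) :
    strongLoop (n : Int) 0 =
      ((PySem.Int.toStr (n : Int)).toList.foldl
        (fun s c => s + (PySem.List.pyGet? pvFactTable
          ((PySem.Int.ofStr? (String.ofList [c])).getD 0)).getD 0) 0) := by
  have hb : ((PySem.Int.toStr (n : Int)).toList.foldl
      (fun s c => s + (PySem.List.pyGet? pvFactTable
        ((PySem.Int.ofStr? (String.ofList [c])).getD 0)).getD 0) 0)
      = ((Nat.toDigits 10 n).map hChar).sum := by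
    have hchars : (PySem.Int.toStr (n : Int)).toList = Nat.toDigits 10 n := by
      rw [PySem.Int.toList_toStr, PySem.Int.toChars]
      have : ¬ ((n : Int) < 0) := by omega
      simp [this]
    rw [hchars]
    have := foldl_hChar (Nat.toDigits 10 n) 0
    simpa [hChar] using this
  rw [hb, toDigits_sum, strongLoop_eq n 0 hn]
  ring

-- ===== VERDICT (by name: the statement is the Claim_ definition above) =====
theorem strongNum_spec : Claim_equal_strongNum := by
  intro num _ hpre
  unfold Spec_strongNum strongNum strongNum_alt
  obtain ⟨n, rfl⟩ := Int.eq_ofNat_of_zero_le hpre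
  by_cases hn : n = 0
  · subst hn
    rw [show ((0 : Nat) : Int) = 0 from rfl, strongLoop]
    decide
  · rw [total_eq n (by omega)]
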